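-- pv_equiv track=rewrite | github.com/Asthanaji05/Litcoder | Python/Contests/Stock Combination Finder.py | find_stock_combinations
-- ===== SOURCE A (Python) =====
-- from itertools import product
--
-- def find_stock_combinations(target_budget, stocks):
--     # Check for invalid inputs: target budget or stock prices
--     if target_budget <= 0:
--         return "Invalid input"
--
--     for stock in stocks:
--         if stock[1] <= 0:
--             return "The stock prices should be at least greater than 0"
--         if stock[1] > target_budget:
--             return "One of the stock prices is higher than the target price"
--
--     # Prepare variables for combinations
--     valid_combinations = []
--     prices = [stock[1] for stock in stocks]
--     num_stocks = len(stocks)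
--
--     # Generate combinations using product with quantities 0 to 5 for each stock
--     for quantities in product(range(6), repeat=num_stocks):
--         total_cost = sum(q * p for q, p in zip(quantities, prices))
--
--         # Check if total cost matches the target budget
--         if total_cost == target_budget:
--             valid_combinations.append(list(quantities))
--
--     # Sort combinations in ascending order
--     valid_combinations.sort()
--
--     # Prepare the output
--     if valid_combinations:
--         output = "\n".join(" ".join(map(str, comb)) for comb in valid_combinations)
--         return f"{output}\n{len(valid_combinations)}"
--     else:
--         return "No valid combinations found"
-- ===== SOURCE B (Python) =====
-- def find_stock_combinations(target_budget, stocks):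
--     if target_budget <= 0:
--         return "Invalid input"
--     for stock in stocks:
--         if stock[1] <= 0:
--             return "The stock prices should be at least greater than 0"
--         if stock[1] > target_budget:
--             return "One of the stock prices is higher than the target price"
--     prices = [stock[1] for stock in stocks]
--
--     # DFS backtracking: quantities tried in ascending order per stock, so the
--     # combinations come out already in lexicographic order; prune as soon as the
--     # partial cost exceeds the remaining budget (prices are positive here).
--     def dfs(i, remaining):
--         if i == len(prices):
--             return [[]] if remaining == 0 else []
--         p = prices[i]
--         out = []
--         q = 0
--         while q <= 5 and q * p <= remaining:
--             out.extend([q] + tail for tail in dfs(i + 1, remaining - q * p))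
--             q += 1
--         return out
--
--     combos = dfs(0, target_budget)
--     if not combos:
--         return "No valid combinations found"
--     lines = [" ".join(map(str, c)) for c in combos]
--     return "\n".join(lines) + "\n" + str(len(combos))
-- ===== Notes on version B (the rewrite author's own statement) =====
-- stated objective: alternative
-- what changed: Replaced the exhaustive enumeration of all 6^n quantity tuples followed by a sort with a DFS backtracking search that prunes a branch as soon as the partial cost exceeds the remaining budget and emits the combinations directly in lexicographic order, so no sort is needed.
import Mathlib
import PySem

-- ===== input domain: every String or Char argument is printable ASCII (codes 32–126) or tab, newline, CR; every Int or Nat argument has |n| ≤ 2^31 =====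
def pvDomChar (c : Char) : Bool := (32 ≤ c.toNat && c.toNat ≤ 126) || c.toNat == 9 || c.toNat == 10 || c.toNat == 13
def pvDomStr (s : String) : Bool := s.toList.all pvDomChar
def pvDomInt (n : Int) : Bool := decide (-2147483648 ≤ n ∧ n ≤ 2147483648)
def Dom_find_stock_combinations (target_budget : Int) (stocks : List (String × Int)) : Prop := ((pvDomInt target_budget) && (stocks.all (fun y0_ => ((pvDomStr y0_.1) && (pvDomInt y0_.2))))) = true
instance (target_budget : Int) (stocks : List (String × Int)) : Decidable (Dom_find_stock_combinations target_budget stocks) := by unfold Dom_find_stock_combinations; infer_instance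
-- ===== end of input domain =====

-- B replaces A's exhaustive 6^n cartesian product + sort by a DFS backtracking search that
-- prunes when the partial cost exceeds the remaining budget and emits the combinations in
-- lexicographic order directly, so no sort is needed (objective: alternative algorithm).

-- ===== PORT A =====
-- the validation for-loop (returns the first error message, if any)
def pvCheckA (target_budget : Int) : List (String × Int) → Option String
  | [] => none
  | s :: rest =>
    if s.2 ≤ 0 then some "The stock prices should be at least greater than 0"
    else if s.2 > target_budget then some "One of the stock prices is higher than the target price"
    else pvCheckA target_budget rest

-- product(range(6), repeat=n), first coordinate varying slowest (CPython's order)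
def pvProd6 : Nat → List (List Int)
  | 0 => [[]]
  | n + 1 => (List.range 6).flatMap (fun (q : Nat) => (pvProd6 n).map (fun t => ((q : Int)) :: t))

-- sum(q * p for q, p in zip(quantities, prices))
def pvDot (qs ps : List Int) : Int := ((qs.zip ps).map (fun qp => qp.1 * qp.2)).sum

def find_stock_combinations (target_budget : Int) (stocks : List (String × Int)) : String :=
  if target_budget ≤ 0 then "Invalid input"
  else
    match pvCheckA target_budget stocks with
    | some msg => msg
    | none =>
      let prices := stocks.map (fun s => s.2)
      let valid := (pvProd6 stocks.length).filter (fun qs => pvDot qs prices == target_budget)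
      let sortedValid := PySem.List.sorted valid (fun x => x) false
      if sortedValid.isEmpty then "No valid combinations found"
      else
        PySem.Str.join "\n" (sortedValid.map (fun c => PySem.Str.join " " (c.map PySem.Int.toStr)))
          ++ "\n" ++ PySem.Int.toStr (sortedValid.length : Int)

-- ===== PORT B =====
-- B's identical validation loop
def pvCheckB (target_budget : Int) : List (String × Int) → Option String
  | [] => none
  | s :: rest =>
    if s.2 ≤ 0 then some "The stock prices should be at least greater than 0"
    else if s.2 > target_budget then some "One of the stock prices is higher than the target price"
    else pvCheckB target_budget rest

-- the inner 'while q <= 5 and q * p <= remaining' loop of B's dfs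
def pvDfsLoop (rec : Int → List (List Int)) (p rem : Int) (q : Nat) : List (List Int) :=
  if h : q ≤ 5 ∧ (q : Int) * p ≤ rem then
    ((rec (rem - (q : Int) * p)).map (fun t => ((q : Int)) :: t)) ++ pvDfsLoop rec p rem (q + 1)
  else []
termination_by 6 - q
decreasing_by omega

-- B's dfs(i, remaining), with the price suffix in place of the index i
def pvDfs : List Int → Int → List (List Int)
  | [], rem => if rem = 0 then [[]] else []
  | p :: ps, rem => pvDfsLoop (pvDfs ps) p rem 0

def find_stock_combinations_alt (target_budget : Int) (stocks : List (String × Int)) : String :=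
  if target_budget ≤ 0 then "Invalid input"
  else
    match pvCheckB target_budget stocks with
    | some msg => msg
    | none =>
      let combos := pvDfs (stocks.map (fun s => s.2)) target_budget
      if combos.isEmpty then "No valid combinations found"
      else
        let lines := combos.map (fun c => PySem.Str.join " " (c.map PySem.Int.toStr))
        PySem.Str.join "\n" lines ++ "\n" ++ PySem.Int.toStr (combos.length : Int)

-- ===== PRECONDITION & SPEC =====
def Spec_find_stock_combinations (target_budget : Int) (stocks : List (String × Int)) (out : String) : Prop := out = find_stock_combinations_alt target_budget stocks
instance (target_budget : Int) (stocks : List (String × Int)) (out : String) : Decidable (Spec_find_stock_combinations target_budget stocks out) := by unfold Spec_find_stock_combinations; infer_instance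

-- ===== CLAIM (what is proved, stated in full; the proofs are below) =====
def Claim_equal_find_stock_combinations : Prop := ∀ (target_budget : Int) (stocks : List (String × Int)), Dom_find_stock_combinations target_budget stocks → Spec_find_stock_combinations target_budget stocks (find_stock_combinations target_budget stocks)

-- ===== LEMMAS AND PROOFS =====

theorem pvCheck_eq (tb : Int) (stocks : List (String × Int)) :
    pvCheckB tb stocks = pvCheckA tb stocks := by
  induction stocks with
  | nil => rfl
  | cons s rest ih => simp only [pvCheckA, pvCheckB, ih]

theorem pvCheckA_none_pos (tb : Int) (stocks : List (String × Int))
    (h : pvCheckA tb stocks = none) : ∀ s ∈ stocks, 0 < s.2 := by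
  induction stocks with
  | nil => simp
  | cons s rest ih =>
    simp only [pvCheckA] at h
    split_ifs at h with h1 h2
    intro x hx
    rcases List.mem_cons.mp hx with rfl | hx'
    · omega
    · exact ih h x hx'

theorem pvDot_cons (q p : Int) (t ps : List Int) :
    pvDot (q :: t) (p :: ps) = q * p + pvDot t ps := by
  simp [pvDot]

theorem mem_pvProd6_nonneg {n : Nat} {t : List Int} (h : t ∈ pvProd6 n) :
    ∀ x ∈ t, 0 ≤ x := by
  induction n generalizing t with
  | zero => simp [pvProd6] at h; subst h; simp
  | succ n ih =>
    simp only [pvProd6, List.mem_flatMap, List.mem_map, List.mem_range] at h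
    obtain ⟨q, _, t', ht', rfl⟩ := h
    intro x hx
    rcases List.mem_cons.mp hx with rfl | hx'
    · exact_mod_cast Nat.zero_le q
    · exact ih ht' x hx'

theorem pvDot_nonneg {t ps : List Int} (ht : ∀ x ∈ t, 0 ≤ x) (hp : ∀ p ∈ ps, 0 < p) :
    0 ≤ pvDot t ps := by
  induction t generalizing ps with
  | nil => simp [pvDot]
  | cons q t ih =>
    cases ps with
    | nil => simp [pvDot]
    | cons p ps =>
      rw [pvDot_cons]
      have h1 : 0 ≤ q := ht q (by simp)
      have h2 : 0 < p := hp p (by simp)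
      have h3 : 0 ≤ pvDot t ps :=
        ih (fun x hx => ht x (by simp [hx])) (fun x hx => hp x (by simp [hx]))
      linarith [mul_nonneg h1 h2.le]

theorem filter_flatMap {α β : Type} (l : List α) (f : α → List β) (p : β → Bool) :
    (l.flatMap f).filter p = l.flatMap (fun a => (f a).filter p) := by
  induction l with
  | nil => rfl
  | cons a l ih => simp [List.flatMap_cons, List.filter_append, ih]

theorem pvDfsLoop_eq (p : Int) (ps : List Int) (rem : Int) (hp : 0 < p)
    (hps : ∀ x ∈ ps, 0 < x)
    (IH : ∀ r, pvDfs ps r = (pvProd6 ps.length).filter (fun t => pvDot t ps == r)) :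
    ∀ (k q : Nat), q + k = 6 →
      pvDfsLoop (pvDfs ps) p rem q =
        (List.range' q k).flatMap (fun (q' : Nat) =>
          ((pvProd6 ps.length).filter (fun t => pvDot t ps == rem - (q' : Int) * p)).map
            (fun t => ((q' : Int)) :: t)) := by
  intro k
  induction k with
  | zero =>
    intro q hq
    rw [pvDfsLoop, dif_neg (by omega)]
    rfl
  | succ k ihk =>
    intro q hq
    rw [pvDfsLoop]
    by_cases hle : (q : Int) * p ≤ rem
    · rw [dif_pos ⟨by omega, hle⟩, List.range'_succ, List.flatMap_cons,
        ihk (q + 1) (by omega), IH]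
    · rw [dif_neg (by tauto)]
      symm
      rw [List.flatMap_eq_nil_iff]
      intro q' hq'
      have hq'' : q ≤ q' := (List.mem_range'_1.mp hq').1
      have hmono : (q : Int) * p ≤ (q' : Int) * p := by
        apply mul_le_mul_of_nonneg_right _ (le_of_lt hp)
        exact_mod_cast hq''
      have hneg : rem - (q' : Int) * p < 0 := by omega
      rw [List.map_eq_nil_iff, List.filter_eq_nil_iff]
      intro t ht
      have h0 : 0 ≤ pvDot t ps := pvDot_nonneg (mem_pvProd6_nonneg ht) hps
      simp only [beq_iff_eq]
      omega

theorem pvDfs_eq (ps : List Int) (hps : ∀ x ∈ ps, 0 < x) (rem : Int) :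
    pvDfs ps rem = (pvProd6 ps.length).filter (fun t => pvDot t ps == rem) := by
  induction ps generalizing rem with
  | nil =>
    simp only [pvDfs, List.length_nil, pvProd6]
    by_cases h : rem = 0 <;> simp [h, pvDot] <;> omega
  | cons p ps ih =>
    have hp : 0 < p := hps p (by simp)
    have hps' : ∀ x ∈ ps, 0 < x := fun x hx => hps x (by simp [hx])
    rw [pvDfs, pvDfsLoop_eq p ps rem hp hps' (ih hps') 6 0 rfl]
    rw [List.length_cons, pvProd6, filter_flatMap, List.range_eq_range']
    apply List.flatMap_congr
    intro q _
    rw [List.filter_map]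
    congr 1
    apply List.filter_congr
    intro t _
    simp only [Function.comp_apply, pvDot_cons]
    rw [Bool.eq_iff_iff]
    simp only [beq_iff_eq]
    omega

theorem pairwise_flatMap_aux {α β : Type} {R : β → β → Prop} {l : List α} {f : α → List β}
    (h1 : ∀ a ∈ l, (f a).Pairwise R)
    (h2 : l.Pairwise (fun a b => ∀ x ∈ f a, ∀ y ∈ f b, R x y)) :
    (l.flatMap f).Pairwise R := by
  induction l with
  | nil => simp
  | cons a l ih =>
    rw [List.flatMap_cons, List.pairwise_append]
    rw [List.pairwise_cons] at h2
    refine ⟨h1 a (by simp), ih (fun b hb => h1 b (by simp [hb])) h2.2, ?_⟩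
    intro x hx y hy
    rw [List.mem_flatMap] at hy
    obtain ⟨b, hb, hyb⟩ := hy
    exact h2.1 b hb x hx y hyb

theorem pvProd6_pairwise (n : Nat) : (pvProd6 n).Pairwise (· < ·) := by
  induction n with
  | zero => simp [pvProd6]
  | succ n ih =>
    rw [pvProd6]
    apply pairwise_flatMap_aux
    · intro q _
      rw [List.pairwise_map]
      exact ih.imp (fun h => List.Lex.cons h)
    · apply List.Pairwise.imp _ (List.pairwise_lt_range (n := 6))
      intro a b hab x hx y hy
      rw [List.mem_map] at hx hy
      obtain ⟨t, _, rfl⟩ := hx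
      obtain ⟨t', _, rfl⟩ := hy
      exact List.Lex.rel (by exact_mod_cast hab)

-- ===== VERDICT (by name: the statement is the Claim_ definition above) =====
theorem find_stock_combinations_spec : Claim_equal_find_stock_combinations := by
  intro tb stocks _
  unfold Spec_find_stock_combinations find_stock_combinations find_stock_combinations_alt
  by_cases htb : tb ≤ 0
  · simp [htb]
  · simp only [if_neg htb, pvCheck_eq]
    cases h : pvCheckA tb stocks with
    | some msg => rfl
    | none =>
      have hpos : ∀ x ∈ stocks.map (fun s => s.2), 0 < x := by
        intro x hx
        rw [List.mem_map] at hx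
        obtain ⟨s, hs, rfl⟩ := hx
        exact pvCheckA_none_pos tb stocks h s hs
      have hlist : PySem.List.sorted
          ((pvProd6 stocks.length).filter
            (fun qs => pvDot qs (stocks.map (fun s => s.2)) == tb)) (fun x => x) false
          = pvDfs (stocks.map (fun s => s.2)) tb := by
        rw [pvDfs_eq _ hpos, List.length_map,
          show (fun (a b : List Int) => a.decidableLT b) = (LinearOrder.toDecidableLT (α := List Int))
            from funext fun a => funext fun b => Subsingleton.elim _ _]
        exact PySem.List.sorted_eq_of_perm_of_pairwise_lt _ _ _ (List.Perm.refl _)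
          ((pvProd6_pairwise stocks.length).filter _)
      simp only [hlist]
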